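-- pv_equiv track=rewrite | github.com/khicken/CSDS310 | Presentation/main.py | starmaxxing2_
-- ===== SOURCE A (Python) =====
-- def starmaxxing2_(S) -> int:
--     n = len(S)
--     cur_sum = 0
--     pc_e0 = 0
--     pc_g0 = 0
--
--     # exploits that whatever subarrays sum>0, add that to total
--
--     sum_freq = [0] * (2 * n + 1) # freq array of weighted sums
--     sum_freq[n] += 1 # we have a zero sum alr
--
--     c = 0
--     for s in S:
--         if s: # star exists
--             cur_sum = cur_sum + 1
--             cc_g0 = 1 + pc_e0 + pc_g0
--             # above: +1 for subarray [1] + all subarrays w/ sum=0 now have sum=1 + all subarrays w/ sum>0 are still sum>0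
--         else: # star don't exist
--             cur_sum = cur_sum - 1
--             cc_g0 = pc_g0 - sum_freq[cur_sum + n]
--             # above: + all subarrays w/ sum>0 now hvae sum>-1 (aka sum>=0). so, remove those with sum=0 since we know how many zero sums there have been
--
--         pc_e0 = sum_freq[cur_sum + n]
--         # straightforward; get count of all subarrays whose sum is 0
--         pc_g0 = cc_g0
--         # trivial
--         sum_freq[cur_sum + n] += 1
--         c += cc_g0 # update total count for all subarrays w/ sum>0
--     return c
-- ===== SOURCE B (Python) =====
-- def starmaxxing2_(S) -> int:
--     # prefix sums of +/-1 weights; answer = # ordered pairs i<j with P[i] < P[j]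
--     P = [0]
--     cur = 0
--     for s in S:
--         cur += 1 if s else -1
--         P.append(cur)
--     c = 0
--     seen = []
--     for p in P:
--         for q in seen:
--             if q < p:
--                 c += 1
--         seen.append(p)
--     return c
-- ===== Notes on version B (the rewrite author's own statement) =====
-- stated objective: simpler
-- what changed: Replaces the incremental frequency-array bookkeeping with an explicit prefix-sum table followed by a plain double loop counting pairs (i,j), i<j, with P[i] < P[j].
import Mathlib
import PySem

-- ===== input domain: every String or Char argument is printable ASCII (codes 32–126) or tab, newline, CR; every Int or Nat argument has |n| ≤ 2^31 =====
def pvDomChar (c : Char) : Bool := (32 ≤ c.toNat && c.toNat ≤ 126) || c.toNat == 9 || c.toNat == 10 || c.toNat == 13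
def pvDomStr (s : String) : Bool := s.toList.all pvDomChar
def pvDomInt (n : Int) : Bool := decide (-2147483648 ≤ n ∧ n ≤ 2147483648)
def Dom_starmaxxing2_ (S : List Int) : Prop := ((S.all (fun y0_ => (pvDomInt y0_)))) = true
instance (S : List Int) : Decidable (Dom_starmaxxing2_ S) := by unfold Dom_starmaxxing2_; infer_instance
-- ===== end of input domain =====

-- B replaces A's incremental frequency-array bookkeeping with an explicit prefix-sum table
-- and a plain double loop counting pairs P[i] < P[j], i < j (simpler, not faster).


-- ===== PORT A =====
-- one loop iteration of A (cur_sum, pc_e0, pc_g0, sum_freq, c); indices cur_sum+n are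
-- always in [0, 2n] here, where pyGetD/pySetD are exact for Python's sum_freq[...]
def stepA (n : Nat) (st : Int × Int × Int × List Int × Int) (s : Int) :
    Int × Int × Int × List Int × Int :=
  let cur := st.1
  let pe := st.2.1
  let pg := st.2.2.1
  let sf := st.2.2.2.1
  let c := st.2.2.2.2
  let (cur', cc) :=
    if s ≠ 0 then (cur + 1, 1 + pe + pg)
    else (cur - 1, pg - PySem.List.pyGetD sf ((cur - 1) + n) 0)
  let pe' := PySem.List.pyGetD sf (cur' + n) 0
  let sf' := PySem.List.pySetD sf (cur' + n) (pe' + 1)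
  (cur', pe', cc, sf', c + cc)

def starmaxxing2_ (S : List Int) : Int :=
  let n := S.length
  let sf0 := PySem.List.pySetD (List.replicate (2 * n + 1) (0 : Int)) (n : Int) (0 + 1)
  (S.foldl (stepA n) (0, 0, 0, sf0, 0)).2.2.2.2

-- ===== PORT B =====
def starmaxxing2__alt (S : List Int) : Int :=
  let pc := S.foldl (fun (pc : List Int × Int) s =>
      let cur := pc.2 + (if s ≠ 0 then (1 : Int) else -1)
      (pc.1 ++ [cur], cur)) ([0], 0)
  let P := pc.1
  (P.foldl (fun (st : Int × List Int) p =>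
      (st.2.foldl (fun c q => if q < p then c + 1 else c) st.1, st.2 ++ [p])) (0, [])).1

-- ===== PRECONDITION & SPEC =====
def Spec_starmaxxing2_ (S : List Int) (out : Int) : Prop := out = starmaxxing2__alt S
instance (S : List Int) (out : Int) : Decidable (Spec_starmaxxing2_ S out) := by unfold Spec_starmaxxing2_; infer_instance

-- ===== CLAIM (what is proved, stated in full; the proofs are below) =====
def Claim_equal_starmaxxing2_ : Prop := ∀ (S : List Int), Dom_starmaxxing2_ S → Spec_starmaxxing2_ S (starmaxxing2_ S)

-- ===== LEMMAS AND PROOFS =====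

-- prefix sums produced while scanning `rest` starting from running sum `cur`
def psums (cur : Int) : List Int → List Int
  | [] => []
  | s :: t => (cur + (if s ≠ 0 then 1 else -1)) :: psums (cur + (if s ≠ 0 then 1 else -1)) t

-- pair count: for each p of the list in order, how many earlier values (seen first) are < p
def gcnt (seen : List Int) : List Int → Int
  | [] => 0
  | p :: t => (seen.countP (fun q => decide (q < p)) : Int) + gcnt (seen ++ [p]) t

lemma countP_lt_split (Q : List Int) (a : Int) :
    Q.countP (fun x => decide (x < a + 1)) =
      Q.countP (fun x => decide (x < a)) + Q.countP (fun x => decide (x = a)) := by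
  induction Q with
  | nil => simp
  | cons x t ih =>
    simp only [List.countP_cons, ih]
    by_cases h1 : x < a
    · have h3 : x < a + 1 := by omega
      have h2 : ¬ x = a := by omega
      simp [h1, h2, h3]
      omega
    · by_cases h2 : x = a
      · have h3 : x < a + 1 := by omega
        simp [h2, h3]
        omega
      · have h3 : ¬ x < a + 1 := by omega
        simp [h1, h2, h3]

lemma loopA (rest : List Int) : ∀ (n : Nat) (Q : List Int) (cur pe pg c : Int) (sf : List Int),
    sf.length = 2 * n + 1 →
    (Q.length + 1) + rest.length = n + 1 →
    -(Q.length : Int) ≤ cur → cur ≤ (Q.length : Int) →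
    (∀ v : Int, -(n : Int) ≤ v → v ≤ n →
      PySem.List.pyGetD sf (v + n) 0 = ((Q ++ [cur]).countP (fun x => decide (x = v)) : Int)) →
    pe = (Q.countP (fun x => decide (x = cur)) : Int) →
    pg = ((Q ++ [cur]).countP (fun x => decide (x < cur)) : Int) →
    (rest.foldl (stepA n) (cur, pe, pg, sf, c)).2.2.2.2 = c + gcnt (Q ++ [cur]) (psums cur rest) := by
  induction rest with
  | nil => intro n Q cur pe pg c sf _ _ _ _ _ _ _; simp [gcnt, psums]
  | cons s t ih =>
    intro n Q cur pe pg c sf hlen hcount hblo hbhi hfreq hpe hpg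
    have hcount' : Q.length + 1 + (t.length + 1) = n + 1 := by simpa using hcount
    have hQn : Q.length + 1 ≤ n := by omega
    obtain ⟨w, hw⟩ : ∃ w : Int, w = if s ≠ 0 then 1 else -1 := ⟨_, rfl⟩
    obtain ⟨cur', hcur'⟩ : ∃ x : Int, x = cur + w := ⟨_, rfl⟩
    have hcases : cur' = cur + 1 ∨ cur' = cur - 1 := by
      rw [hcur', hw]; by_cases hs : s ≠ 0
      · left; rw [if_pos hs]
      · right; rw [if_neg hs]; ring
    have hb1 : -((Q.length : Int) + 1) ≤ cur' := by rcases hcases with h | h <;> omega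
    have hb2 : cur' ≤ (Q.length : Int) + 1 := by rcases hcases with h | h <;> omega
    have hlo : -(n : Int) ≤ cur' := by omega
    have hhi : cur' ≤ (n : Int) := by omega
    -- value read/written at index cur' + n
    have hread : PySem.List.pyGetD sf (cur' + n) 0
        = ((Q ++ [cur]).countP (fun x => decide (x = cur')) : Int) := hfreq cur' hlo hhi
    -- the new cc equals the pair count contributed by position |Q|+1
    have hcc :
        (if s ≠ 0 then (cur + 1, 1 + pe + pg)
         else (cur - 1, pg - PySem.List.pyGetD sf ((cur - 1) + n) 0))
        = (cur', ((Q ++ [cur]).countP (fun x => decide (x < cur')) : Int)) := by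
      by_cases hs : s ≠ 0
      · have hc1 : cur' = cur + 1 := by rw [hcur', hw, if_pos hs]
        rw [if_pos hs, Prod.mk.injEq]
        refine ⟨hc1.symm, ?_⟩
        have h1 := countP_lt_split (Q ++ [cur]) cur
        have h2 : (Q ++ [cur]).countP (fun x => decide (x = cur))
            = Q.countP (fun x => decide (x = cur)) + 1 := by simp [List.countP_append]
        rw [hpe, hpg, hc1]
        push_cast [h1, h2]; omega
      · have hc1 : cur' = cur - 1 := by rw [hcur', hw, if_neg hs]; ring
        rw [if_neg hs, Prod.mk.injEq]
        refine ⟨hc1.symm, ?_⟩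
        have h1 := countP_lt_split (Q ++ [cur]) (cur - 1)
        rw [show cur - 1 + 1 = cur by ring] at h1
        rw [hpg, show cur - 1 + (n : Int) = cur' + n by rw [hc1], hread, hc1]
        push_cast [h1]; omega
    -- unfold one step
    have hsf_len_pos : ((cur' + n).toNat) < sf.length := by
      rw [hlen]; omega
    have hidx : cur' + (n : Int) = ((cur' + n).toNat : Int) := by omega
    -- new frequency table invariant
    have hread2 : PySem.List.pyGetD sf (((cur' + n).toNat : Nat) : Int) 0
        = ((Q ++ [cur]).countP (fun x => decide (x = cur')) : Int) := by
      rw [← hidx]; exact hread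
    have hfreq' : ∀ v : Int, -(n : Int) ≤ v → v ≤ n →
        PySem.List.pyGetD (PySem.List.pySetD sf (cur' + n)
            (PySem.List.pyGetD sf (cur' + n) 0 + 1)) (v + n) 0
          = (((Q ++ [cur]) ++ [cur']).countP (fun x => decide (x = v)) : Int) := by
      intro v hv1 hv2
      have hvidx : v + (n : Int) = (((v + n).toNat : Nat) : Int) := by omega
      rw [hidx, hvidx, PySem.List.pyGetD_pySetD_natCast sf _ _ _ _ hsf_len_pos]
      by_cases hv : v = cur'
      · have he : ((v + (n : Int)).toNat) = ((cur' + (n : Int)).toNat) := by omega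
        rw [if_pos he, hread2, hv]
        push_cast [List.countP_append]
        simp
      · have he : ((v + (n : Int)).toNat) ≠ ((cur' + (n : Int)).toNat) := by omega
        rw [if_neg he, ← hvidx, hfreq v hv1 hv2]
        have hne : ¬ (cur' = v) := fun h => hv h.symm
        simp only [List.countP_append, List.countP_cons, List.countP_nil]
        by_cases hc : cur = v <;> simp [hc, hne]
    have hstep : stepA n (cur, pe, pg, sf, c) s
        = (cur', ((Q ++ [cur]).countP (fun x => decide (x = cur')) : Int),
           ((Q ++ [cur]).countP (fun x => decide (x < cur')) : Int),
           PySem.List.pySetD sf (cur' + n) (PySem.List.pyGetD sf (cur' + n) 0 + 1),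
           c + ((Q ++ [cur]).countP (fun x => decide (x < cur')) : Int)) := by
      simp only [stepA, hcc, hread]
    have hrec := ih n (Q ++ [cur]) cur'
      (((Q ++ [cur]).countP (fun x => decide (x = cur')) : Int))
      (((Q ++ [cur]).countP (fun x => decide (x < cur')) : Int))
      (c + ((Q ++ [cur]).countP (fun x => decide (x < cur')) : Int))
      (PySem.List.pySetD sf (cur' + n) (PySem.List.pyGetD sf (cur' + n) 0 + 1))
      (by rw [hidx, PySem.List.pySetD_natCast]; simp [hlen])
      (by simp; omega)
      (by simp; omega)
      (by simp; omega)
      hfreq'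
      rfl
      (by
        simp only [List.countP_append, List.countP_cons, List.countP_nil]
        by_cases hc : cur < cur' <;> simp [hc])
    simp only [List.foldl_cons, hstep]
    rw [hrec]
    have hps : psums cur (s :: t) = cur' :: psums cur' t := by
      simp [psums, hcur', hw]
    rw [hps]
    simp only [gcnt]
    ring

-- B: building the prefix table
lemma buildB (S : List Int) : ∀ (acc : List Int) (cur : Int),
    (S.foldl (fun (pc : List Int × Int) s =>
        let cur := pc.2 + (if s ≠ 0 then (1 : Int) else -1)
        (pc.1 ++ [cur], cur)) (acc, cur)).1 = acc ++ psums cur S := by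
  induction S with
  | nil => intro acc cur; simp [psums]
  | cons s t ih =>
    intro acc cur
    simp only [List.foldl_cons]
    rw [ih]
    simp [psums]

-- B: the inner loop counts the earlier values below p
lemma innerB (seen : List Int) : ∀ (c p : Int),
    seen.foldl (fun c q => if q < p then c + 1 else c) c
      = c + (seen.countP (fun q => decide (q < p)) : Int) := by
  induction seen with
  | nil => intro c p; simp
  | cons q t ih =>
    intro c p
    simp only [List.foldl_cons, List.countP_cons]
    by_cases h : q < p
    · rw [if_pos h, ih]; simp [h]; ring
    · rw [if_neg h, ih]; simp [h]

-- B: the outer loop computes gcnt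
lemma outerB (P : List Int) : ∀ (c : Int) (seen : List Int),
    (P.foldl (fun (st : Int × List Int) p =>
        (st.2.foldl (fun c q => if q < p then c + 1 else c) st.1, st.2 ++ [p])) (c, seen)).1
      = c + gcnt seen P := by
  induction P with
  | nil => intro c seen; simp [gcnt]
  | cons p t ih =>
    intro c seen
    rw [List.foldl_cons, ih, innerB]
    simp only [gcnt]
    ring

lemma altB (S : List Int) : starmaxxing2__alt S = gcnt [0] (psums 0 S) := by
  unfold starmaxxing2__alt
  simp only [buildB S [0] 0, outerB]
  simp [gcnt]

lemma initFreq (n : Nat) (v : Int) (h1 : -(n : Int) ≤ v) (_h2 : v ≤ n) :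
    PySem.List.pyGetD
        (PySem.List.pySetD (List.replicate (2 * n + 1) (0 : Int)) (n : Int) (0 + 1)) (v + n) 0
      = ((([] : List Int) ++ [0]).countP (fun x => decide (x = v)) : Int) := by
  have hvidx : v + (n : Int) = (((v + n).toNat : Nat) : Int) := by omega
  rw [hvidx, PySem.List.pyGetD_pySetD_natCast _ _ _ _ _ (by simp; omega)]
  by_cases hv : v = 0
  · rw [if_pos (by omega)]
    simp [hv]
  · rw [if_neg (by omega), PySem.List.pyGetD_natCast, List.getD_eq_getElem?_getD]
    simp only [List.getElem?_replicate]
    have hne : ¬ ((0 : Int) = v) := fun h => hv h.symm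
    split <;> simp [hne]

-- ===== VERDICT (by name: the statement is the Claim_ definition above) =====
theorem starmaxxing2__spec : Claim_equal_starmaxxing2_ := by
  intro S _
  unfold Spec_starmaxxing2_
  rw [altB]
  unfold starmaxxing2_
  have h := loopA S S.length [] 0 0 0 0
    (PySem.List.pySetD (List.replicate (2 * S.length + 1) (0 : Int)) ((S.length : Nat) : Int) (0 + 1))
    (by rw [PySem.List.pySetD_natCast]; simp)
    (by simp only [List.length_nil]; omega)
    (by simp)
    (by simp)
    (fun v h1 h2 => initFreq S.length v h1 h2)
    (by simp)
    (by simp)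
  simpa using h
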